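-- pv_equiv track=rewrite | github.com/rmoff/rmoff-blog | scripts/wordpress-to-hugo.py | add_excerpt_marker
-- ===== SOURCE A (Python) =====
-- def add_excerpt_marker(content: str) -> str:
--     """Add <!--more--> after the first paragraph."""
--     # Find the first paragraph break (double newline)
--     lines = content.split('\n')
--     result = []
--     added_marker = False
--     blank_line_count = 0
--
--     for i, line in enumerate(lines):
--         result.append(line)
--
--         # After first substantial paragraph, add marker
--         if not added_marker and line.strip() == '':
--             blank_line_count += 1
--             # Add after first paragraph (first blank line after content)
--             if blank_line_count == 1 and i > 0 and lines[i-1].strip():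
--                 result.append('<!--more-->')
--                 added_marker = True
--
--     return '\n'.join(result)
-- ===== SOURCE B (Python) =====
-- def add_excerpt_marker(content: str) -> str:
--     """Add <!--more--> after the first paragraph."""
--     lines = content.split('\n')
--     i = _first_blank(lines)
--     if i is not None and i > 0 and lines[i - 1].strip():
--         lines.insert(i + 1, '<!--more-->')
--     return '\n'.join(lines)
--
--
-- def _first_blank(lines):
--     for i, line in enumerate(lines):
--         if not line.strip():
--             return i
--     return None
-- ===== Notes on version B (the rewrite author's own statement) =====
-- stated objective: simpler
-- what changed: Replaces the flag-carrying accumulator loop (added_marker/blank_line_count, rebuilding the whole result list) by finding the index of the first blank line and splicing the marker into the line list at one position.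
import Mathlib
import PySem

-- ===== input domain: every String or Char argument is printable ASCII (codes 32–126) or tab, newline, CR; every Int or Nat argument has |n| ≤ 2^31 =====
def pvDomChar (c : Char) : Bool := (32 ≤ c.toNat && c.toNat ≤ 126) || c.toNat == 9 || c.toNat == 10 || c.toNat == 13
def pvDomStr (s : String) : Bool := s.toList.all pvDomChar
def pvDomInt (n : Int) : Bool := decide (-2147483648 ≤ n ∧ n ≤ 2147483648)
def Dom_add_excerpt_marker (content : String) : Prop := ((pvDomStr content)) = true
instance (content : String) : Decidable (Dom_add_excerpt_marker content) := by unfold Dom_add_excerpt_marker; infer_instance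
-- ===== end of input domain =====

-- B replaces A's flag-carrying accumulator loop by locating the first blank line and splicing the marker in once; objective: simpler.

-- ===== PORT A =====
-- the loop body of A's for-loop, state = (result, added_marker, blank_line_count)
def aStep (lines : List String) (st : List String × Bool × Int) (p : Int × String) :
    List String × Bool × Int :=
  let result := st.1 ++ [p.2]
  if !st.2.1 && (PySem.Str.strip p.2 == "") then
    let cnt := st.2.2 + 1
    if cnt == 1 && decide (0 < p.1) && !(PySem.Str.strip (PySem.List.pyGetD lines (p.1 - 1) "") == "") then
      (result ++ ["<!--more-->"], true, cnt)
    else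
      (result, st.2.1, cnt)
  else
    (result, st.2.1, st.2.2)

-- content.split('\n'): split? is some because the separator "\n" is non-empty
def add_excerpt_marker (content : String) : String :=
  let lines := (PySem.Str.split? content "\n").getD []
  let st := (PySem.List.enumerate lines 0).foldl (aStep lines) ([], false, 0)
  PySem.Str.join "\n" st.1

-- ===== PORT B =====
-- _first_blank: index of the first line whose strip() is empty
def firstBlank : List String → Nat → Option Nat
  | [], _ => none
  | l :: ls, i => if PySem.Str.strip l == "" then some i else firstBlank ls (i + 1)

def add_excerpt_marker_alt (content : String) : String :=
  let lines := (PySem.Str.split? content "\n").getD []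
  let lines' :=
    match firstBlank lines 0 with
    | none => lines
    | some i =>
      if 0 < i ∧ PySem.Str.strip (PySem.List.pyGetD lines ((i : Int) - 1) "") ≠ "" then
        PySem.List.insert lines ((i : Int) + 1) "<!--more-->"
      else lines
  PySem.Str.join "\n" lines'

-- ===== PRECONDITION & SPEC =====
def Spec_add_excerpt_marker (content : String) (out : String) : Prop := out = add_excerpt_marker_alt content
instance (content : String) (out : String) : Decidable (Spec_add_excerpt_marker content out) := by unfold Spec_add_excerpt_marker; infer_instance

-- ===== CLAIM (what is proved, stated in full; the proofs are below) =====
def Claim_equal_add_excerpt_marker : Prop := ∀ (content : String), Dom_add_excerpt_marker content → Spec_add_excerpt_marker content (add_excerpt_marker content)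

-- ===== LEMMAS AND PROOFS =====

-- A's loop over a prefix of non-blank lines just copies them; flags stay (false, 0)
theorem fold_nonblank (lines : List String) :
    ∀ (pre : List String) (s : Int) (res : List String),
      (∀ l ∈ pre, (PySem.Str.strip l == "") = false) →
      (PySem.List.enumerate pre s).foldl (aStep lines) (res, false, 0) = (res ++ pre, false, 0) := by
  intro pre
  induction pre with
  | nil => intro s res _; simp [PySem.List.enumerate_nil]
  | cons l ls ih =>
    intro s res h
    rw [PySem.List.enumerate_cons, List.foldl_cons]
    have hl : (PySem.Str.strip l == "") = false := h l (by simp)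
    have hstep : aStep lines (res, false, 0) (s, l) = (res ++ [l], false, 0) := by
      simp [aStep, hl]
    rw [hstep, ih (s + 1) (res ++ [l]) (fun x hx => h x (by simp [hx]))]
    simp

-- once added_marker is true the loop only appends the remaining lines
theorem fold_added (lines : List String) :
    ∀ (es : List (Int × String)) (res : List String) (cnt : Int),
      es.foldl (aStep lines) (res, true, cnt) = (res ++ es.map (·.2), true, cnt) := by
  intro es
  induction es with
  | nil => intro res cnt; simp
  | cons p ps ih =>
    intro res cnt
    rw [List.foldl_cons]
    have hstep : aStep lines (res, true, cnt) p = (res ++ [p.2], true, cnt) := by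
      simp [aStep]
    rw [hstep, ih]
    simp

-- after the first blank line failed to trigger (cnt ≥ 1), the loop only appends
theorem fold_late (lines : List String) :
    ∀ (tail : List String) (s : Int) (res : List String) (cnt : Int), 1 ≤ cnt →
      ((PySem.List.enumerate tail s).foldl (aStep lines) (res, false, cnt)).1 = res ++ tail := by
  intro tail
  induction tail with
  | nil => intro s res cnt _; simp [PySem.List.enumerate_nil]
  | cons l ls ih =>
    intro s res cnt hc
    rw [PySem.List.enumerate_cons, List.foldl_cons]
    by_cases hl : (PySem.Str.strip l == "") = true
    · have hne : (cnt + 1 == (1 : Int)) = false := by simp; omega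
      have hstep : aStep lines (res, false, cnt) (s, l) = (res ++ [l], false, cnt + 1) := by
        simp [aStep, hl, hne]
      rw [hstep, ih (s + 1) (res ++ [l]) (cnt + 1) (by omega)]
      simp
    · have hstep : aStep lines (res, false, cnt) (s, l) = (res ++ [l], false, cnt) := by
        simp [aStep, Bool.eq_false_iff.mpr hl]
      rw [hstep, ih (s + 1) (res ++ [l]) cnt hc]
      simp

-- firstBlank skips a non-blank prefix
theorem firstBlank_append (pre tail : List String) :
    ∀ (s : Nat), (∀ l ∈ pre, (PySem.Str.strip l == "") = false) →
      firstBlank (pre ++ tail) s = firstBlank tail (s + pre.length) := by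
  induction pre with
  | nil => intro s _; simp
  | cons l ls ih =>
    intro s h
    have hl : (PySem.Str.strip l == "") = false := h l (by simp)
    simp only [List.cons_append, firstBlank, hl]
    rw [if_neg (by simp), ih (s + 1) (fun x hx => h x (by simp [hx]))]
    congr 1
    simp
    omega

theorem firstBlank_none (lines : List String) :
    ∀ (s : Nat), (∀ l ∈ lines, (PySem.Str.strip l == "") = false) →
      firstBlank lines s = none := by
  induction lines with
  | nil => intro s _; rfl
  | cons l ls ih =>
    intro s h
    have hl : (PySem.Str.strip l == "") = false := h l (by simp)
    simp only [firstBlank]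
    rw [if_neg (by simp [hl])]
    exact ih (s + 1) (fun x hx => h x (by simp [hx]))

-- every line list is a non-blank prefix, possibly followed by a first blank line
theorem split_first : ∀ (lines : List String),
    (∀ l ∈ lines, (PySem.Str.strip l == "") = false) ∨
      ∃ pre b rest, lines = pre ++ b :: rest ∧
        (∀ l ∈ pre, (PySem.Str.strip l == "") = false) ∧ (PySem.Str.strip b == "") = true := by
  intro lines
  induction lines with
  | nil => left; simp
  | cons x xs ih =>
    by_cases hx : (PySem.Str.strip x == "") = true
    · right; exact ⟨[], x, xs, by simp, by simp, hx⟩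
    · rcases ih with h | ⟨pre, b, rest, h1, h2, h3⟩
      · left
        intro l hl
        rcases List.mem_cons.mp hl with h' | h'
        · subst h'; simpa using hx
        · exact h l h'
      · right
        refine ⟨x :: pre, b, rest, by simp [h1], ?_, h3⟩
        intro l hl
        rcases List.mem_cons.mp hl with h' | h'
        · subst h'; simpa using hx
        · exact h2 l h'

-- the common core: both programs, as functions of the split line list
theorem core_eq (lines : List String) :
    ((PySem.List.enumerate lines 0).foldl (aStep lines) ([], false, 0)).1 =
      (match firstBlank lines 0 with
       | none => lines
       | some i =>
         if 0 < i ∧ PySem.Str.strip (PySem.List.pyGetD lines ((i : Int) - 1) "") ≠ "" then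
           PySem.List.insert lines ((i : Int) + 1) "<!--more-->"
         else lines) := by
  rcases split_first lines with hall | ⟨pre, b, rest, hl, hprenb, hbs⟩
  · rw [firstBlank_none lines 0 hall, fold_nonblank lines lines 0 [] hall]
    simp
  · -- A side
    have hA : ((PySem.List.enumerate lines 0).foldl (aStep lines) ([], false, 0)).1 =
        (if 0 < pre.length ∧ PySem.Str.strip (PySem.List.pyGetD lines ((pre.length : Int) - 1) "") ≠ "" then
           pre ++ [b, "<!--more-->"] ++ rest
         else pre ++ b :: rest) := by
      rw [show PySem.List.enumerate lines 0 =
            PySem.List.enumerate pre 0 ++ PySem.List.enumerate (b :: rest) (0 + pre.length) by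
            rw [hl]; exact PySem.List.enumerate_append _ _ _]
      rw [List.foldl_append, fold_nonblank lines pre 0 [] hprenb]
      rw [PySem.List.enumerate_cons, List.foldl_cons]
      simp only [List.nil_append, zero_add]
      by_cases hcond : 0 < pre.length ∧ PySem.Str.strip (PySem.List.pyGetD lines ((pre.length : Int) - 1) "") ≠ ""
      · have hstep : aStep lines (pre, false, 0) ((pre.length : Int), b) =
            (pre ++ [b, "<!--more-->"], true, 1) := by
          obtain ⟨h1, h2⟩ := hcond
          have h0 : pre ≠ [] := List.ne_nil_of_length_pos h1
          have h2' : (PySem.Str.strip (PySem.List.pyGetD lines ((pre.length : Int) - 1) "") == "") = false := by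
            simpa using h2
          simp [aStep, hbs, h0, h2']
        rw [hstep, fold_added lines _ _ 1, if_pos hcond]
        simp [PySem.List.map_snd_enumerate]
      · have hstep : aStep lines (pre, false, 0) ((pre.length : Int), b) =
            (pre ++ [b], false, 1) := by
          simp [aStep, hbs]
          intro h1
          by_contra hne
          exact hcond ⟨by exact_mod_cast h1, hne⟩
        rw [hstep, fold_late lines rest _ _ 1 le_rfl, if_neg hcond]
        simp
    -- B side
    have hFB : firstBlank lines 0 = some pre.length := by
      rw [hl, firstBlank_append pre (b :: rest) 0 hprenb]
      simp [firstBlank, hbs]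
    rw [hA, hFB]
    have hmatch : (match some pre.length with
       | none => lines
       | some i =>
         if 0 < i ∧ PySem.Str.strip (PySem.List.pyGetD lines ((i : Int) - 1) "") ≠ "" then
           PySem.List.insert lines ((i : Int) + 1) "<!--more-->"
         else lines) =
        (if 0 < pre.length ∧ PySem.Str.strip (PySem.List.pyGetD lines ((pre.length : Int) - 1) "") ≠ "" then
           PySem.List.insert lines ((pre.length : Int) + 1) "<!--more-->"
         else lines) := rfl
    rw [hmatch]
    by_cases hcond : 0 < pre.length ∧ PySem.Str.strip (PySem.List.pyGetD lines ((pre.length : Int) - 1) "") ≠ ""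
    · rw [if_pos hcond, if_pos hcond]
      have hle : pre.length + 1 ≤ lines.length := by rw [hl]; simp
      rw [show ((pre.length : Int) + 1) = ((pre.length + 1 : Nat) : Int) by push_cast; ring]
      rw [PySem.List.insert_natCast lines (pre.length + 1) _ hle, hl]
      rw [List.take_append, List.drop_append]
      rw [List.take_of_length_le (by omega), List.drop_eq_nil_of_le (by omega)]
      simp
    · rw [if_neg hcond, if_neg hcond, hl]

-- ===== VERDICT (by name: the statement is the Claim_ definition above) =====
theorem add_excerpt_marker_spec : Claim_equal_add_excerpt_marker := by
  intro content _
  unfold Spec_add_excerpt_marker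
  simp only [add_excerpt_marker, add_excerpt_marker_alt, core_eq]
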